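-- pv_equiv track=rewrite | github.com/eduardomiranda/job-application-portal | analista-implementacao-tecnica-privacyops.py | _apply_executive_email_styles
-- ===== SOURCE A (Python) =====
-- def _apply_executive_email_styles(html_fragment):
--     if not html_fragment:
--         return ""
--
--     styled = html_fragment
--     replacements = {
--         "<h1>": '<h1 style="margin:16px 0 4px 0; font-size:22px; line-height:1.3; color:#0f172a;">',
--         "<h2>": '<h2 style="margin:14px 0 4px 0; font-size:20px; line-height:1.3; color:#0f172a;">',
--         "<h3>": '<h3 style="margin:12px 0 4px 0; font-size:18px; line-height:1.35; color:#0f172a;">',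
--         "<h4>": '<h4 style="margin:10px 0 4px 0; font-size:16px; line-height:1.4; color:#0f172a;">',
--         "<h5>": '<h5 style="margin:10px 0 4px 0; font-size:15px; line-height:1.4; color:#0f172a;">',
--         "<h6>": '<h6 style="margin:10px 0 4px 0; font-size:14px; line-height:1.4; color:#0f172a;">',
--         "<p>": '<p style="margin:0 0 10px 0; font-size:14px; line-height:1.6;">',
--         "<ul>": '<ul style="margin:4px 0 12px 20px; padding:0;">',
--         "<ol>": '<ol style="margin:4px 0 12px 20px; padding:0;">',
--         "<li>": '<li style="margin:0 0 6px 0; line-height:1.6;">',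
--         "<strong>": '<strong style="color:#0f172a;">',
--         "<blockquote>": '<blockquote style="margin:10px 0; padding:8px 12px; border-left:3px solid #d0d7de; color:#374151;">',
--     }
--
--     for source, target in replacements.items():
--         styled = styled.replace(source, target)
--
--     return styled
-- ===== SOURCE B (Python) =====
-- _TABLE = {
--     "<h1>": '<h1 style="margin:16px 0 4px 0; font-size:22px; line-height:1.3; color:#0f172a;">',
--     "<h2>": '<h2 style="margin:14px 0 4px 0; font-size:20px; line-height:1.3; color:#0f172a;">',
--     "<h3>": '<h3 style="margin:12px 0 4px 0; font-size:18px; line-height:1.35; color:#0f172a;">',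
--     "<h4>": '<h4 style="margin:10px 0 4px 0; font-size:16px; line-height:1.4; color:#0f172a;">',
--     "<h5>": '<h5 style="margin:10px 0 4px 0; font-size:15px; line-height:1.4; color:#0f172a;">',
--     "<h6>": '<h6 style="margin:10px 0 4px 0; font-size:14px; line-height:1.4; color:#0f172a;">',
--     "<p>": '<p style="margin:0 0 10px 0; font-size:14px; line-height:1.6;">',
--     "<ul>": '<ul style="margin:4px 0 12px 20px; padding:0;">',
--     "<ol>": '<ol style="margin:4px 0 12px 20px; padding:0;">',
--     "<li>": '<li style="margin:0 0 6px 0; line-height:1.6;">',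
--     "<strong>": '<strong style="color:#0f172a;">',
--     "<blockquote>": '<blockquote style="margin:10px 0; padding:8px 12px; border-left:3px solid #d0d7de; color:#374151;">',
-- }
--
--
-- def _apply_executive_email_styles(html_fragment):
--     # Single left-to-right scan: at each '<' try to match one of the known
--     # opening tags and emit its styled form, otherwise copy the character.
--     if not html_fragment:
--         return ""
--     out = []
--     i = 0
--     n = len(html_fragment)
--     while i < n:
--         if html_fragment[i] == "<":
--             for token, styled in _TABLE.items():
--                 if html_fragment.startswith(token, i):
--                     out.append(styled)
--                     i += len(token)
--                     break
--             else:
--                 out.append(html_fragment[i])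
--                 i += 1
--         else:
--             out.append(html_fragment[i])
--             i += 1
--     return "".join(out)
-- ===== Notes on version B (the rewrite author's own statement) =====
-- stated objective: alternative
-- what changed: A makes twelve sequential whole-string str.replace passes (one per tag); B makes a single left-to-right scan that, dispatches each candidate opening tag through one token-to-styled-tag table and otherwise copies characters.
import Mathlib
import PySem

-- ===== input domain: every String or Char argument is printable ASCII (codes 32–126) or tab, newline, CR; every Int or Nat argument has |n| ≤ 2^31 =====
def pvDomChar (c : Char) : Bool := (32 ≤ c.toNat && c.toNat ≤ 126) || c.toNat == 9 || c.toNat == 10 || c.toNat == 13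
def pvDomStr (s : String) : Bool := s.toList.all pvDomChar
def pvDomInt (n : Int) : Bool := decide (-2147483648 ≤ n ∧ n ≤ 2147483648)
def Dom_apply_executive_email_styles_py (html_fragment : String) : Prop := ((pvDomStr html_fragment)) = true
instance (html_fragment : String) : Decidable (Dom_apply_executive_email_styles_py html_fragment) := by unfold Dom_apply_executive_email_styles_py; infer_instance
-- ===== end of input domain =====

-- B replaces A's twelve sequential str.replace passes with a single left-to-right
-- scan that dispatches each candidate opening tag through one lookup table
-- (objective: alternative single-pass decomposition; same return value).

-- ===== PORT A =====
-- the replacements dict of A, in insertion order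
def pairsA : List (String × String) :=
  [("<h1>", "<h1 style=\"margin:16px 0 4px 0; font-size:22px; line-height:1.3; color:#0f172a;\">"),
   ("<h2>", "<h2 style=\"margin:14px 0 4px 0; font-size:20px; line-height:1.3; color:#0f172a;\">"),
   ("<h3>", "<h3 style=\"margin:12px 0 4px 0; font-size:18px; line-height:1.35; color:#0f172a;\">"),
   ("<h4>", "<h4 style=\"margin:10px 0 4px 0; font-size:16px; line-height:1.4; color:#0f172a;\">"),
   ("<h5>", "<h5 style=\"margin:10px 0 4px 0; font-size:15px; line-height:1.4; color:#0f172a;\">"),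
   ("<h6>", "<h6 style=\"margin:10px 0 4px 0; font-size:14px; line-height:1.4; color:#0f172a;\">"),
   ("<p>", "<p style=\"margin:0 0 10px 0; font-size:14px; line-height:1.6;\">"),
   ("<ul>", "<ul style=\"margin:4px 0 12px 20px; padding:0;\">"),
   ("<ol>", "<ol style=\"margin:4px 0 12px 20px; padding:0;\">"),
   ("<li>", "<li style=\"margin:0 0 6px 0; line-height:1.6;\">"),
   ("<strong>", "<strong style=\"color:#0f172a;\">"),
   ("<blockquote>", "<blockquote style=\"margin:10px 0; padding:8px 12px; border-left:3px solid #d0d7de; color:#374151;\">")]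

-- A: `for source, target in replacements.items(): styled = styled.replace(source, target)`
def apply_executive_email_styles_py (html_fragment : String) : String :=
  if html_fragment = "" then ""
  else pairsA.foldl (fun styled p => PySem.Str.replace styled p.1 p.2) html_fragment

-- ===== PORT B =====
-- B's _TABLE, keys/values as char lists (same literals, in the same order)
def tableB : List (List Char × List Char) :=
  [("<h1>".toList, "<h1 style=\"margin:16px 0 4px 0; font-size:22px; line-height:1.3; color:#0f172a;\">".toList),
   ("<h2>".toList, "<h2 style=\"margin:14px 0 4px 0; font-size:20px; line-height:1.3; color:#0f172a;\">".toList),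
   ("<h3>".toList, "<h3 style=\"margin:12px 0 4px 0; font-size:18px; line-height:1.35; color:#0f172a;\">".toList),
   ("<h4>".toList, "<h4 style=\"margin:10px 0 4px 0; font-size:16px; line-height:1.4; color:#0f172a;\">".toList),
   ("<h5>".toList, "<h5 style=\"margin:10px 0 4px 0; font-size:15px; line-height:1.4; color:#0f172a;\">".toList),
   ("<h6>".toList, "<h6 style=\"margin:10px 0 4px 0; font-size:14px; line-height:1.4; color:#0f172a;\">".toList),
   ("<p>".toList, "<p style=\"margin:0 0 10px 0; font-size:14px; line-height:1.6;\">".toList),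
   ("<ul>".toList, "<ul style=\"margin:4px 0 12px 20px; padding:0;\">".toList),
   ("<ol>".toList, "<ol style=\"margin:4px 0 12px 20px; padding:0;\">".toList),
   ("<li>".toList, "<li style=\"margin:0 0 6px 0; line-height:1.6;\">".toList),
   ("<strong>".toList, "<strong style=\"color:#0f172a;\">".toList),
   ("<blockquote>".toList, "<blockquote style=\"margin:10px 0; padding:8px 12px; border-left:3px solid #d0d7de; color:#374151;\">".toList)]

-- B's inner `for token, styled in _TABLE.items(): if html_fragment.startswith(token, i): …`
-- returns (len(token), styled) of the first matching table entry
def tryTok : List (List Char × List Char) → List Char → Option (Nat × List Char)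
  | [], _ => none
  | (tok, sty) :: rest, l => if tok.isPrefixOf l then some (tok.length, sty) else tryTok rest l

-- B's while loop: one left-to-right scan emitting styled tags or single characters
def multiScan (tbl : List (List Char × List Char)) : List Char → List Char
  | [] => []
  | c :: t =>
    if c = '<' then
      match tryTok tbl (c :: t) with
      | some (n, sty) => sty ++ multiScan tbl (t.drop (n - 1))   -- i += len(token)
      | none => c :: multiScan tbl t
    else c :: multiScan tbl t
termination_by l => l.length
decreasing_by all_goals (simp; try omega)

def apply_executive_email_styles_py_alt (html_fragment : String) : String :=
  if html_fragment = "" then ""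
  else String.ofList (multiScan tableB html_fragment.toList)

-- ===== PRECONDITION & SPEC =====
def Spec_apply_executive_email_styles_py (html_fragment : String) (out : String) : Prop := out = apply_executive_email_styles_py_alt html_fragment
instance (html_fragment : String) (out : String) : Decidable (Spec_apply_executive_email_styles_py html_fragment out) := by unfold Spec_apply_executive_email_styles_py; infer_instance

-- ===== CLAIM (what is proved, stated in full; the proofs are below) =====
def Claim_equal_apply_executive_email_styles_py : Prop := ∀ (html_fragment : String), Dom_apply_executive_email_styles_py html_fragment → Spec_apply_executive_email_styles_py html_fragment (apply_executive_email_styles_py html_fragment)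

-- ===== LEMMAS AND PROOFS =====

def rep (body new : List Char) : List Char → List Char
  | [] => []
  | c :: t =>
    if ('<' :: body).isPrefixOf (c :: t) then new ++ rep body new (t.drop body.length)
    else c :: rep body new t
termination_by l => l.length
decreasing_by all_goals (simp; try omega)

lemma go_eq (body r : List Char) :
    ∀ (fuel : Nat) (l acc : List Char), l.length ≤ fuel →
      PySem.Chars.replace.go ('<' :: body) r fuel l acc = acc.reverse ++ rep body r l := by
  intro fuel
  induction fuel with
  | zero =>
    intro l acc h
    have : l = [] := List.eq_nil_of_length_eq_zero (Nat.le_zero.mp h)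
    subst this
    rw [PySem.Chars.replace.go, rep]
  | succ fuel ih =>
    intro l acc h
    cases l with
    | nil => rw [PySem.Chars.replace.go, rep] <;> simp
    | cons c t =>
      rw [PySem.Chars.replace.go]
      by_cases hp : ('<' :: body).isPrefixOf (c :: t)
      · rw [if_pos hp, rep, if_pos hp]
        rw [ih _ _ (by simp at h ⊢; omega)]
        simp
      · rw [if_neg hp, rep, if_neg hp, ih _ _ (by simp at h ⊢; omega)]
        simp

lemma replace_eq_rep (body r l : List Char) :
    PySem.Chars.replace l ('<' :: body) r = rep body r l := by
  rw [PySem.Chars.replace]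
  simp [go_eq body r l.length l [] (le_refl _)]

def noStart (tok a : List Char) : Bool :=
  (List.range a.length).all fun j => !(tok.isPrefixOf (a.drop j)) && !((a.drop j).isPrefixOf tok)

lemma noStart_cons {tok : List Char} {c : Char} {a : List Char}
    (h : noStart tok (c :: a) = true) : noStart tok a = true := by
  simp only [noStart, List.all_eq_true, List.mem_range] at h ⊢
  intro j hj
  have := h (j + 1) (by simp; omega)
  simpa using this

lemma noStart_head {tok : List Char} {c : Char} {a : List Char}
    (h : noStart tok (c :: a) = true) :
    ¬ tok <+: (c :: a) ∧ ¬ (c :: a) <+: tok := by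
  simp only [noStart, List.all_eq_true, List.mem_range] at h
  have h0 := h 0 (by simp)
  simp only [List.drop_zero, Bool.and_eq_true, Bool.not_eq_true'] at h0
  exact ⟨fun hp => by simp [List.isPrefixOf_iff_prefix.mpr hp] at h0,
         fun hp => by simp [List.isPrefixOf_iff_prefix.mpr hp] at h0⟩

lemma rep_append_of_noStart {body r : List Char} (a : List Char) {u : List Char}
    (h : noStart ('<' :: body) a = true) :
    rep body r (a ++ u) = a ++ rep body r u := by
  induction a with
  | nil => simp
  | cons c a ih =>
    have hh := noStart_head h
    have hnp : ¬ ('<' :: body) <+: (c :: (a ++ u)) := by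
      intro hpre
      rcases List.prefix_or_prefix_of_prefix hpre (List.prefix_append (c :: a) u) with h1 | h1
      · exact hh.1 h1
      · exact hh.2 h1
    rw [List.cons_append, rep, if_neg (by simpa [List.isPrefixOf_iff_prefix] using hnp),
        ih (noStart_cons h), List.cons_append]

lemma rep_tok (body r u : List Char) :
    rep body r (('<' :: body) ++ u) = r ++ rep body r u := by
  rw [List.cons_append, rep,
      if_pos (by simp [List.isPrefixOf_iff_prefix]),
      List.drop_left]

lemma tryTok_mem : ∀ {tbl : List (List Char × List Char)} {l : List Char} {n : Nat} {sty : List Char},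
    tryTok tbl l = some (n, sty) →
    ∃ q ∈ tbl, q.1.length = n ∧ q.2 = sty ∧ q.1 <+: l := by
  intro tbl
  induction tbl with
  | nil => intro l n sty h; simp [tryTok] at h
  | cons p tbl ih =>
    intro l n sty h
    obtain ⟨tok, r⟩ := p
    rw [tryTok] at h
    by_cases hp : tok.isPrefixOf l
    · rw [if_pos hp] at h
      refine ⟨(tok, r), by simp, ?_⟩
      cases h
      exact ⟨rfl, rfl, List.isPrefixOf_iff_prefix.mp hp⟩
    · rw [if_neg hp] at h
      obtain ⟨q, hq, hrest⟩ := ih h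
      exact ⟨q, by simp [hq], hrest⟩

lemma tryTok_append_some {t1 t2 : List (List Char × List Char)} {l : List Char} {x : Nat × List Char}
    (h : tryTok t1 l = some x) : tryTok (t1 ++ t2) l = some x := by
  induction t1 with
  | nil => simp [tryTok] at h
  | cons p t1 ih =>
    obtain ⟨tok, r⟩ := p
    rw [tryTok] at h
    rw [List.cons_append, tryTok]
    by_cases hp : tok.isPrefixOf l
    · rw [if_pos hp] at h ⊢; exact h
    · rw [if_neg hp] at h ⊢; exact ih h

lemma tryTok_append_none {t1 t2 : List (List Char × List Char)} {l : List Char}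
    (h : tryTok t1 l = none) : tryTok (t1 ++ t2) l = tryTok t2 l := by
  induction t1 with
  | nil => simp
  | cons p t1 ih =>
    obtain ⟨tok, r⟩ := p
    rw [tryTok] at h
    rw [List.cons_append, tryTok]
    by_cases hp : tok.isPrefixOf l
    · rw [if_pos hp] at h; exact absurd h (by simp)
    · rw [if_neg hp] at h ⊢; exact ih h

lemma multiScan_cons_ne {tbl : List (List Char × List Char)} {c : Char} {t : List Char}
    (hc : c ≠ '<') : multiScan tbl (c :: t) = c :: multiScan tbl t := by
  rw [multiScan]; simp [hc]

lemma multiScan_cons_none {tbl : List (List Char × List Char)} {t : List Char}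
    (h : tryTok tbl ('<' :: t) = none) : multiScan tbl ('<' :: t) = '<' :: multiScan tbl t := by
  rw [multiScan]; simp [h]

lemma multiScan_cons_some {tbl : List (List Char × List Char)} {t : List Char} {n : Nat} {sty : List Char}
    (h : tryTok tbl ('<' :: t) = some (n, sty)) :
    multiScan tbl ('<' :: t) = sty ++ multiScan tbl (t.drop (n - 1)) := by
  rw [multiScan]; simp [h]

lemma prefix_multiScan {tbl : List (List Char × List Char)}
    (htbl : ∀ q ∈ tbl, q.2.head? = some '<') :
    ∀ (t body : List Char), body ≠ [] → '<' ∉ body →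
      body <+: multiScan tbl t → body <+: t := by
  intro t
  induction t with
  | nil =>
    intro body hb1 _ hp
    rw [multiScan] at hp
    exact absurd (List.prefix_nil.mp hp) hb1
  | cons c t ih =>
    intro body hb1 hb2 hp
    by_cases hc : c = '<'
    · subst hc
      cases htry : tryTok tbl ('<' :: t) with
      | some x =>
        obtain ⟨n, sty⟩ := x
        rw [multiScan_cons_some htry] at hp
        obtain ⟨q, hq, _, hsty, _⟩ := tryTok_mem htry
        -- sty starts with '<', body does not: body <+: sty ++ _ is impossible
        obtain ⟨b0, body', rfl⟩ := List.exists_cons_of_ne_nil hb1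
        have hhead : (sty ++ multiScan tbl (t.drop (n-1))).head? = some '<' := by
          have := htbl q hq
          rw [hsty] at this
          cases sty with
          | nil => simp at this
          | cons s0 s' => simp at this ⊢; exact this
        obtain ⟨w, hw⟩ := hp
        have hhw := congrArg List.head? hw
        rw [hhead] at hhw
        simp at hhw
        exact absurd hhw.symm (by simp at hb2; exact hb2.1)
      | none =>
        rw [multiScan_cons_none htry] at hp
        obtain ⟨b0, body', rfl⟩ := List.exists_cons_of_ne_nil hb1
        rw [List.cons_prefix_cons] at hp ⊢
        refine ⟨hp.1, ?_⟩
        rcases List.eq_nil_or_concat body' with h' | _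
        · subst h'; simp
        · exact ih body' (by rename_i h'; obtain ⟨_,_,rfl⟩ := h'; simp)
            (by simp at hb2; exact hb2.2) hp.2
    · rw [multiScan_cons_ne hc] at hp
      obtain ⟨b0, body', rfl⟩ := List.exists_cons_of_ne_nil hb1
      rw [List.cons_prefix_cons] at hp ⊢
      refine ⟨hp.1, ?_⟩
      rcases List.eq_nil_or_concat body' with h' | _
      · subst h'; simp
      · exact ih body' (by rename_i h'; obtain ⟨_,_,rfl⟩ := h'; simp)
          (by simp at hb2; exact hb2.2) hp.2

lemma rep_cons_of_not_prefix {body r : List Char} {c : Char} {t : List Char}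
    (h : ¬ ('<' :: body) <+: (c :: t)) : rep body r (c :: t) = c :: rep body r t := by
  rw [rep]; simp [List.isPrefixOf_iff_prefix, h]

lemma multiScan_free {tbl : List (List Char × List Char)} (b : List Char) {u : List Char}
    (hb : '<' ∉ b) : multiScan tbl (b ++ u) = b ++ multiScan tbl u := by
  induction b with
  | nil => simp
  | cons c b ih =>
    simp only [List.mem_cons, not_or] at hb
    rw [List.cons_append, multiScan_cons_ne (fun h => hb.1 h.symm), ih hb.2, List.cons_append]

lemma chain_snoc {tbl : List (List Char × List Char)} {body r : List Char}
    (hb1 : body ≠ []) (hb2 : '<' ∉ body)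
    (htbl : ∀ q ∈ tbl, q.2.head? = some '<' ∧ noStart ('<' :: body) q.2 = true) :
    ∀ l, rep body r (multiScan tbl l) = multiScan (tbl ++ [('<' :: body, r)]) l := by
  have main : ∀ (N : Nat) (l : List Char), l.length ≤ N →
      rep body r (multiScan tbl l) = multiScan (tbl ++ [('<' :: body, r)]) l := by
    intro N
    induction N with
    | zero =>
      intro l h
      have : l = [] := List.eq_nil_of_length_eq_zero (Nat.le_zero.mp h)
      subst this
      rw [multiScan, multiScan, rep]
    | succ N ihN =>
      intro l h
      cases l with
      | nil => rw [multiScan, multiScan, rep]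
      | cons c t =>
        by_cases hc : c = '<'
        · subst hc
          cases htry : tryTok tbl ('<' :: t) with
          | some x =>
            obtain ⟨n, sty⟩ := x
            rw [multiScan_cons_some htry,
                multiScan_cons_some (tryTok_append_some htry)]
            obtain ⟨q, hq, _, hsty, _⟩ := tryTok_mem htry
            rw [rep_append_of_noStart sty (hsty ▸ (htbl q hq).2),
                ihN _ (by simp at h ⊢; omega)]
          | none =>
            by_cases hpre : ('<' :: body) <+: ('<' :: t)
            · -- the new token matches here
              obtain ⟨u, hu⟩ : ∃ u, t = body ++ u := by
                rw [List.cons_prefix_cons] at hpre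
                obtain ⟨u, hu⟩ := hpre.2
                exact ⟨u, hu.symm⟩
              subst hu
              rw [multiScan_cons_none htry, multiScan_free body hb2,
                  ← List.cons_append, rep_tok]
              have htry2 : tryTok (tbl ++ [('<' :: body, r)]) ('<' :: (body ++ u))
                  = some (('<' :: body).length, r) := by
                rw [tryTok_append_none htry, tryTok,
                    if_pos (List.isPrefixOf_iff_prefix.mpr (by exact ⟨u, by simp⟩))]
              rw [multiScan_cons_some htry2]
              simp only [List.length_cons, Nat.add_sub_cancel, List.drop_left]
              rw [ihN _ (by simp at h ⊢; omega)]
            · -- nothing matches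
              rw [multiScan_cons_none htry]
              have hnp : ¬ ('<' :: body) <+: ('<' :: multiScan tbl t) := by
                intro hp
                rw [List.cons_prefix_cons] at hp hpre
                exact hpre ⟨rfl, prefix_multiScan (fun q hq => (htbl q hq).1) t body hb1 hb2 hp.2⟩
              rw [rep_cons_of_not_prefix hnp]
              have htry2 : tryTok (tbl ++ [('<' :: body, r)]) ('<' :: t) = none := by
                rw [tryTok_append_none htry, tryTok,
                    if_neg (fun hp => hpre (List.isPrefixOf_iff_prefix.mp hp))]
                rfl
              rw [multiScan_cons_none htry2, ihN _ (by simp at h; omega)]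
        · rw [multiScan_cons_ne hc, multiScan_cons_ne hc,
              rep_cons_of_not_prefix (by intro hp; rw [List.cons_prefix_cons] at hp; exact hc hp.1.symm),
              ihN _ (by simp at h; omega)]
  exact fun l => main l.length l (le_refl _)

def okp (p : List Char × List Char) : Bool :=
  (p.1.head? == some '<') && !p.1.tail.isEmpty && !p.1.tail.contains '<' && (p.2.head? == some '<')

lemma snoc_fold :
    ∀ (t2 t1 : List (List Char × List Char)),
      (∀ p ∈ t2, okp p = true) →
      (∀ p ∈ t2, ∀ q ∈ t1, q.2.head? = some '<' ∧ noStart p.1 q.2 = true) →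
      List.Pairwise (fun q p => q.2.head? = some '<' ∧ noStart p.1 q.2 = true) t2 →
      ∀ l, t2.foldl (fun acc p => PySem.Chars.replace acc p.1 p.2) (multiScan t1 l)
           = multiScan (t1 ++ t2) l := by
  intro t2
  induction t2 with
  | nil => intro t1 _ _ _ l; simp
  | cons p t2 ih =>
    intro t1 h1 h2 hpw l
    have hokp : p.1.head? = some '<' ∧ p.1.tail ≠ [] ∧ '<' ∉ p.1.tail ∧ p.2.head? = some '<' := by
      have := h1 p (by simp)
      simp only [okp, Bool.and_eq_true, beq_iff_eq, Bool.not_eq_true',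
        List.isEmpty_eq_false_iff, List.contains_eq_mem, decide_eq_false_iff_not] at this
      tauto
    have h1a := hokp.1
    obtain ⟨body, hbody⟩ : ∃ body, p.1 = '<' :: body := by
      cases hp1 : p.1 with
      | nil => simp [hp1] at h1a
      | cons c tl => rw [hp1] at h1a; simp at h1a; exact ⟨tl, by rw [h1a]⟩
    have hbt : p.1.tail = body := by rw [hbody, List.tail_cons]
    rw [List.foldl_cons]
    have hrep : PySem.Chars.replace (multiScan t1 l) p.1 p.2
        = multiScan (t1 ++ [p]) l := by
      rw [hbody, replace_eq_rep]
      have := chain_snoc (body := body) (r := p.2) (tbl := t1)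
        (hbt ▸ hokp.2.1) (hbt ▸ hokp.2.2.1)
        (fun q hq => by have := h2 p (by simp) q hq; rwa [hbody] at this) l
      rw [this, ← hbody]
    rw [hrep, ih (t1 ++ [p]) (fun q hq => h1 q (by simp [hq]))
        (fun p' hp' q hq => by
          rcases List.mem_append.mp hq with hq1 | hq1
          · exact h2 p' (by simp [hp']) q hq1
          · have : q = p := by simpa using hq1
            subst this
            exact (List.pairwise_cons.mp hpw).1 p' hp')
        (List.pairwise_cons.mp hpw).2 l]
    simp

lemma multiScan_nil_table : ∀ l, multiScan [] l = l := by
  intro l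
  induction l with
  | nil => rw [multiScan]
  | cons c t ih => rw [multiScan]; simp [tryTok, ih]

set_option maxHeartbeats 1000000 in
lemma chain_eq (l : List Char) :
    tableB.foldl (fun acc p => PySem.Chars.replace acc p.1 p.2) l = multiScan tableB l := by
  have h := snoc_fold tableB [] (by decide)
    (by intro p _ q hq; simp at hq)
    (by decide) l
  simpa [multiScan_nil_table] using h

lemma foldStr (ps : List (String × String)) :
    ∀ s : String,
      ps.foldl (fun acc p => PySem.Str.replace acc p.1 p.2) s
      = String.ofList ((ps.map fun p => (p.1.toList, p.2.toList)).foldl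
          (fun acc p => PySem.Chars.replace acc p.1 p.2) s.toList) := by
  induction ps with
  | nil => intro s; simp
  | cons p ps ih =>
    intro s
    simp only [List.foldl_cons, List.map_cons]
    rw [ih, PySem.Str.replace, String.toList_ofList]

-- ===== VERDICT (by name: the statement is the Claim_ definition above) =====
theorem apply_executive_email_styles_py_spec : Claim_equal_apply_executive_email_styles_py := by
  intro s _
  unfold Spec_apply_executive_email_styles_py
  unfold apply_executive_email_styles_py apply_executive_email_styles_py_alt
  by_cases h : s = ""
  · simp [h]
  · rw [if_neg h, if_neg h]
    rw [foldStr]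
    have hmap : (pairsA.map fun p => (p.1.toList, p.2.toList)) = tableB := by decide
    rw [hmap, chain_eq]
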